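-- pv_equiv track=rewrite | github.com/BarberAlec/Common-Interview-Questions | fib_questions.py | closest_fib_num
-- ===== SOURCE A (Python) =====
-- def next_fib_num(prev,curr):
--     return curr,prev+curr
--
-- def closest_fib_num(num):
--     curr = 1
--     prev = 0
--
--     while curr<num:
--         prev,curr = next_fib_num(prev,curr)
--
--     if abs(curr-num) < abs(prev-num):
--         return curr
--     else:
--         return prev
-- ===== SOURCE B (Python) =====
-- def closest_fib_num(num):
--     # generate-then-select: build the ascending Fibonacci list up to the first
--     # fib >= num, then pick the element minimizing |f - num| (first wins on ties)
--     a, b = 0, 1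
--     fibs = [0, 1]
--     while b < num:
--         a, b = b, a + b
--         fibs.append(b)
--     best = fibs[0]
--     for f in fibs[1:]:
--         if abs(f - num) < abs(best - num):
--             best = f
--     return best
-- ===== Notes on version B (the rewrite author's own statement) =====
-- stated objective: alternative
-- what changed: A tracks only the last two Fibonacci numbers and compares those two candidates at the end; B generates the whole ascending Fibonacci list up to the first fib >= num and then selects the closest element with a first-wins minimum scan.
import Mathlib
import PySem

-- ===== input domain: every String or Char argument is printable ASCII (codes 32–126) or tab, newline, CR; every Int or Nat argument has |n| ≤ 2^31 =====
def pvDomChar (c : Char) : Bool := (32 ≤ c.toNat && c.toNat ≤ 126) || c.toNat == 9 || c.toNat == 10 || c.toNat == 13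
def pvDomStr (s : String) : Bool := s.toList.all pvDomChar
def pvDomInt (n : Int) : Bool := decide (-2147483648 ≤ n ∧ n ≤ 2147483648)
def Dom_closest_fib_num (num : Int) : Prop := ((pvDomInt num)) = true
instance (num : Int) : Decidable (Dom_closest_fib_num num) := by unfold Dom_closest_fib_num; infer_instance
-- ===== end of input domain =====

-- B generates the whole ascending Fibonacci list and selects the closest element
-- (first-wins minimum), instead of A's two-variable loop with a final two-way compare.

-- ===== PORT A =====
def next_fib_num (prev curr : Int) : Int × Int := (curr, prev + curr)

-- A's while loop; fuel (num.toNat + 2) only makes it total, the loop always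
-- exits via the `curr < num` test within that many steps.
def pvALoop (num prev curr : Int) : Nat → Int × Int
  | 0 => (prev, curr)
  | fuel + 1 =>
    if curr < num then
      let pc := next_fib_num prev curr
      pvALoop num pc.1 pc.2 fuel
    else (prev, curr)

def closest_fib_num (num : Int) : Int :=
  let pc := pvALoop num 0 1 (num.toNat + 2)
  if |pc.2 - num| < |pc.1 - num| then pc.2 else pc.1

-- ===== PORT B =====
-- B's while loop: same fuel guard for totality only.
def pvBLoop (num a b : Int) (fibs : List Int) : Nat → List Int
  | 0 => fibs
  | fuel + 1 =>
    if b < num then pvBLoop num b (a + b) (fibs ++ [a + b]) fuel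
    else fibs

-- one step of B's selection loop body
def pvStep (num best f : Int) : Int := if |f - num| < |best - num| then f else best

-- B's `best = fibs[0]; for f in fibs[1:]` scan; [] is unreachable (fibs starts as [0,1])
def pvSelect (num : Int) : List Int → Int
  | [] => 0
  | f0 :: rest => rest.foldl (pvStep num) f0

def closest_fib_num_alt (num : Int) : Int :=
  pvSelect num (pvBLoop num 0 1 [0, 1] (num.toNat + 2))

-- ===== PRECONDITION & SPEC =====
def Spec_closest_fib_num (num : Int) (out : Int) : Prop := out = closest_fib_num_alt num
instance (num : Int) (out : Int) : Decidable (Spec_closest_fib_num num out) := by unfold Spec_closest_fib_num; infer_instance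

-- ===== CLAIM (what is proved, stated in full; the proofs are below) =====
def Claim_equal_closest_fib_num : Prop := ∀ (num : Int), Dom_closest_fib_num num → Spec_closest_fib_num num (closest_fib_num num)

-- ===== LEMMAS AND PROOFS =====

-- the fold result never exceeds a bound dominating the seed and all elements
lemma pvFold_le (num p : Int) : ∀ (l : List Int) (b : Int), b ≤ p → (∀ e ∈ l, e ≤ p) →
    l.foldl (pvStep num) b ≤ p := by
  intro l
  induction l with
  | nil => intro b hb _; simpa using hb
  | cons h t ih =>
    intro b hb hl
    simp only [List.foldl_cons]
    exact ih _ (by unfold pvStep; split <;> [exact hl h (by simp); exact hb])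
      (fun e he => hl e (by simp [he]))

-- folding over l ++ [p] lands exactly on p when everything so far is ≤ p < num
lemma pvFold_last (num p : Int) (l : List Int) (b : Int) (hb : b ≤ p)
    (hl : ∀ e ∈ l, e ≤ p) (hp : p < num) :
    (l ++ [p]).foldl (pvStep num) b = p := by
  have hb' : l.foldl (pvStep num) b ≤ p := pvFold_le num p l b hb hl
  rw [List.foldl_append]
  simp only [List.foldl_cons, List.foldl_nil]
  set m := l.foldl (pvStep num) b with hm
  have h1 : |p - num| = num - p := by rw [abs_of_nonpos (by omega)]; ring
  have h2 : |m - num| = num - m := by rw [abs_of_nonpos (by omega)]; ring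
  unfold pvStep
  rcases lt_or_eq_of_le hb' with h | h
  · rw [if_pos (by omega)]
  · rw [h]; split <;> rfl

-- selecting over prefix ++ [prev, curr] equals A's final two-way compare
lemma pvSelect_final (num prev curr : Int) (pfx : List Int)
    (hpfx : ∀ e ∈ pfx, e ≤ prev) (hp : prev < num) :
    pvSelect num (pfx ++ [prev, curr]) =
      (if |curr - num| < |prev - num| then curr else prev) := by
  cases pfx with
  | nil => simp [pvSelect, pvStep]
  | cons h t =>
    have hcons : pvSelect num ((h :: t) ++ [prev, curr])
        = (t ++ [prev, curr]).foldl (pvStep num) h := rfl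
    have hsplit : t ++ [prev, curr] = (t ++ [prev]) ++ [curr] := by simp
    rw [hcons, hsplit, List.foldl_append,
      pvFold_last num prev t h (hpfx h (by simp)) (fun e he => hpfx e (by simp [he])) hp]
    simp [pvStep]

-- lockstep invariant: B's list is a prefix (all ≤ prev) followed by [prev, curr]
lemma pvLockstep (num : Int) : ∀ (fuel : Nat) (prev curr : Int) (pfx : List Int),
    (∀ e ∈ pfx, e ≤ prev) → 0 ≤ prev → prev ≤ curr → prev < num →
    pvSelect num (pvBLoop num prev curr (pfx ++ [prev, curr]) fuel) =
      (let pc := pvALoop num prev curr fuel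
       if |pc.2 - num| < |pc.1 - num| then pc.2 else pc.1) := by
  intro fuel
  induction fuel with
  | zero =>
    intro prev curr pfx hpfx _ _ hp
    simpa [pvBLoop, pvALoop] using pvSelect_final num prev curr pfx hpfx hp
  | succ fuel ih =>
    intro prev curr pfx hpfx h0 hpc hp
    by_cases hc : curr < num
    · have harr : (pfx ++ [prev, curr]) ++ [prev + curr]
          = (pfx ++ [prev]) ++ [curr, prev + curr] := by simp
      simp only [pvBLoop, pvALoop, next_fib_num, if_pos hc]
      rw [harr]
      exact ih curr (prev + curr) (pfx ++ [prev])
        (by intro e he; rcases List.mem_append.1 he with h | h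
            · exact le_trans (hpfx e h) hpc
            · simp at h; omega)
        (by omega) (by omega) hc
    · simp only [pvBLoop, pvALoop, if_neg hc]
      simpa using pvSelect_final num prev curr pfx hpfx hp

-- ===== VERDICT (by name: the statement is the Claim_ definition above) =====
theorem closest_fib_num_spec : Claim_equal_closest_fib_num := by
  intro num _
  unfold Spec_closest_fib_num closest_fib_num closest_fib_num_alt
  by_cases hpos : 0 < num
  · have := pvLockstep num (num.toNat + 2) 0 1 [] (by simp) le_rfl (by norm_num) hpos
    simpa using this.symm
  · -- num ≤ 0: the loops never run; fuel is 2 and both sides compute on [0, 1]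
    have h2 : num.toNat + 2 = 2 := by omega
    have hnc : ¬ ((1 : Int) < num) := by omega
    rw [h2]
    simp [pvALoop, pvBLoop, pvSelect, pvStep, hnc]
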